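-- pv_equiv track=rewrite | github.com/kuz-vldr/mle-project-sprint-4-v001 | recommendations_service.py | merge_recommendations
-- ===== SOURCE A (Python) =====
-- from typing import Dict, List, Set
--
-- def merge_recommendations(
--     offline_items: List[int],
--     popular_not_in_history: List[int],
--     popular_items: List[int],
--     history_items: List[int],
--     k: int,
-- ) -> List[int]:
--     hist = set(history_items)
--     off = [t for t in offline_items if t not in hist]
--     onl = [t for t in popular_not_in_history if t not in hist]
--
--     result: List[int] = []
--     used: Set[int] = set()
--     i, j = 0, 0
--
--     while len(result) < k and (i < len(off) or j < len(onl)):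
--         if i < len(off):
--             t = off[i]
--             i += 1
--             if t not in used:
--                 result.append(t)
--                 used.add(t)
--         if len(result) >= k:
--             break
--         if j < len(onl):
--             t = onl[j]
--             j += 1
--             if t not in used:
--                 result.append(t)
--                 used.add(t)
--
--     for item_id in popular_items:
--         if len(result) >= k:
--             break
--         if item_id not in used and item_id not in hist:
--             result.append(item_id)
--             used.add(item_id)
--
--     return result
-- ===== SOURCE B (Python) =====
-- def merge_recommendations(offline_items, popular_not_in_history, popular_items, history_items, k):
--     hist = set(history_items)
--     off = [t for t in offline_items if t not in hist]
--     onl = [t for t in popular_not_in_history if t not in hist]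
--
--     # interleave by padding both lists to equal length with None and zip-flattening
--     n = max(len(off), len(onl))
--     pad_off = off + [None] * (n - len(off))
--     pad_onl = onl + [None] * (n - len(onl))
--     candidates = [x for pair in zip(pad_off, pad_onl) for x in pair] + popular_items
--
--     # declarative dedup (first occurrences) of the whole stream, then cut to k
--     ranked = dict.fromkeys(c for c in candidates if c is not None and c not in hist)
--     return list(ranked)[:max(k, 0)]
-- ===== Notes on version B (the rewrite author's own statement) =====
-- stated objective: simpler
-- what changed: Replaces A's stateful index-juggling while loop (used-set, mid-loop breaks) and separate popular-items loop by a declarative pipeline: pad both filtered lists with None and zip-flatten to interleave, append popular_items, dedup the whole stream once with dict.fromkeys, and slice the result to k.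
import Mathlib
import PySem

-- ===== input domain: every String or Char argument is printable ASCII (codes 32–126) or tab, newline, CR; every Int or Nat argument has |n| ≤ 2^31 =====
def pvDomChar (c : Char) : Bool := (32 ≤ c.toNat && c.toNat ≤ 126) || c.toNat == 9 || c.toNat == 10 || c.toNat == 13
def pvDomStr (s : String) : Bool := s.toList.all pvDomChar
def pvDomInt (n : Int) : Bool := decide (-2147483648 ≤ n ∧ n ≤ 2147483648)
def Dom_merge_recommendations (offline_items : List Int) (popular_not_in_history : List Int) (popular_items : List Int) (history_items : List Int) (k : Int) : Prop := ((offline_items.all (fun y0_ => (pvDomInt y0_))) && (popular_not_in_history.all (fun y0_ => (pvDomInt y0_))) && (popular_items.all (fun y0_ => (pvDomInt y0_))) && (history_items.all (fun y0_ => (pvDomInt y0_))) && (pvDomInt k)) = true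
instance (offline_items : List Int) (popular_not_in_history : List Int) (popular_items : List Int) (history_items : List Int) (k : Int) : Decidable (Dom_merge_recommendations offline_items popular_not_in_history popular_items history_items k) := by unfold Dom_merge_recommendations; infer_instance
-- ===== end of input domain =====

-- B replaces A's index-juggling while-loop with used-set and mid-loop breaks by a declarative pipeline: pad-zip-flatten interleave, dict.fromkeys dedup of the whole stream, then slice to k (simpler decomposition, same cost).


-- ===== PORT A =====
-- while-loop of A: consumes off and onl by index (here: structurally), returning (result, used)
def pvWhileA (off onl res : List Int) (used : PySem.Set Int) (k : Int) : List Int × PySem.Set Int :=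
  if (res.length : Int) < k ∧ (off ≠ [] ∨ onl ≠ []) then
    match off, onl with
    | t :: off', onl =>
      let res1 := if PySem.Set.contains used t then res else res ++ [t]
      let used1 := if PySem.Set.contains used t then used else PySem.Set.add used t
      if (res1.length : Int) ≥ k then (res1, used1)
      else
        match onl with
        | s :: onl' =>
          let res2 := if PySem.Set.contains used1 s then res1 else res1 ++ [s]
          let used2 := if PySem.Set.contains used1 s then used1 else PySem.Set.add used1 s
          pvWhileA off' onl' res2 used2 k
        | [] => pvWhileA off' [] res1 used1 k
    | [], s :: onl' =>
      let res2 := if PySem.Set.contains used s then res else res ++ [s]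
      let used2 := if PySem.Set.contains used s then used else PySem.Set.add used s
      pvWhileA [] onl' res2 used2 k
    | [], [] => (res, used)
  else (res, used)
termination_by off.length + onl.length
decreasing_by all_goals (simp only [List.length_cons, List.length_nil]; omega)

-- A's trailing 'for item_id in popular_items' loop
def pvPopLoopA (pop : List Int) (hist : PySem.Set Int) (res : List Int) (used : PySem.Set Int) (k : Int) : List Int :=
  match pop with
  | [] => res
  | p :: rest =>
    if (res.length : Int) ≥ k then res
    else if ¬ PySem.Set.contains used p ∧ ¬ PySem.Set.contains hist p then
      pvPopLoopA rest hist (res ++ [p]) (PySem.Set.add used p) k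
    else pvPopLoopA rest hist res used k

def merge_recommendations (offline_items : List Int) (popular_not_in_history : List Int) (popular_items : List Int) (history_items : List Int) (k : Int) : List Int :=
  let hist := PySem.Set.ofList history_items
  let off := offline_items.filter (fun t => !(PySem.Set.contains hist t))
  let onl := popular_not_in_history.filter (fun t => !(PySem.Set.contains hist t))
  let w := pvWhileA off onl [] ([] : PySem.Set Int) k
  pvPopLoopA popular_items hist w.1 w.2 k

-- ===== PORT B =====
def merge_recommendations_alt (offline_items : List Int) (popular_not_in_history : List Int) (popular_items : List Int) (history_items : List Int) (k : Int) : List Int :=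
  let hist := PySem.Set.ofList history_items
  let off := offline_items.filter (fun t => !(PySem.Set.contains hist t))
  let onl := popular_not_in_history.filter (fun t => !(PySem.Set.contains hist t))
  -- pad both lists to equal length with None, zip, flatten (Optional[int] list)
  let n := max off.length onl.length
  let pad_off := off.map some ++ List.replicate (n - off.length) (none : Option Int)
  let pad_onl := onl.map some ++ List.replicate (n - onl.length) (none : Option Int)
  let candidates := (pad_off.zip pad_onl).flatMap (fun p => [p.1, p.2]) ++ popular_items.map some
  -- dict.fromkeys(c for c in candidates if c is not None and c not in hist) = PySem.List.dedup of the filtered stream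
  let ranked := PySem.List.dedup (candidates.filterMap (fun c =>
    match c with
    | some x => if PySem.Set.contains hist x then none else some x
    | none => none))
  -- list(ranked)[:max(k, 0)] : slice with a nonnegative upper bound = take
  ranked.take (max k 0).toNat

-- ===== PRECONDITION & SPEC =====
def Spec_merge_recommendations (offline_items : List Int) (popular_not_in_history : List Int) (popular_items : List Int) (history_items : List Int) (k : Int) (out : List Int) : Prop := out = merge_recommendations_alt offline_items popular_not_in_history popular_items history_items k
instance (offline_items : List Int) (popular_not_in_history : List Int) (popular_items : List Int) (history_items : List Int) (k : Int) (out : List Int) : Decidable (Spec_merge_recommendations offline_items popular_not_in_history popular_items history_items k out) := by unfold Spec_merge_recommendations; infer_instance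

-- ===== CLAIM =====
def Claim_equal_merge_recommendations : Prop := ∀ (offline_items : List Int) (popular_not_in_history : List Int) (popular_items : List Int) (history_items : List Int) (k : Int), Dom_merge_recommendations offline_items popular_not_in_history popular_items history_items k → Spec_merge_recommendations offline_items popular_not_in_history popular_items history_items k (merge_recommendations offline_items popular_not_in_history popular_items history_items k)

-- ===== LEMMAS AND PROOFS =====

-- proof-side: the one-pass dedup-with-cutoff loop carrying its used-set along (A's two loops both reduce to it)
def pvRun (cand : List Int) (used hist : PySem.Set Int) (res : List Int) (k : Int) : List Int × PySem.Set Int :=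
  match cand with
  | [] => (res, used)
  | t :: rest =>
    if (res.length : Int) ≥ k then (res, used)
    else if ¬ PySem.Set.contains used t ∧ ¬ PySem.Set.contains hist t then
      pvRun rest (PySem.Set.add used t) hist (res ++ [t]) k
    else pvRun rest used hist res k

-- proof-side: dedup avoiding an initial used-set
def pvDedupAvoid (used : PySem.Set Int) : List Int → List Int
  | [] => []
  | c :: rest =>
    if PySem.Set.contains used c then pvDedupAvoid used rest
    else c :: pvDedupAvoid (PySem.Set.add used c) rest

-- interleave of two lists (first-occurrence order of B's zip-flatten)
def pvInterleave : List Int → List Int → List Int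
  | [], ys => ys
  | x :: xs, [] => x :: xs
  | x :: xs, y :: ys => x :: y :: pvInterleave xs ys

theorem pvPopLoopA_eq_run (pop : List Int) (hist : PySem.Set Int) (res : List Int) (used : PySem.Set Int) (k : Int) :
    pvPopLoopA pop hist res used k = (pvRun pop used hist res k).1 := by
  induction pop generalizing used res with
  | nil => rfl
  | cons p rest ih =>
    simp only [pvPopLoopA, pvRun]
    split_ifs <;> simp [ih]

theorem pvRun_append (l1 l2 : List Int) (used hist : PySem.Set Int) (res : List Int) (k : Int) :
    pvRun (l1 ++ l2) used hist res k =
      pvRun l2 (pvRun l1 used hist res k).2 hist (pvRun l1 used hist res k).1 k := by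
  induction l1 generalizing used res with
  | nil => rfl
  | cons t rest ih =>
    simp only [List.cons_append, pvRun]
    split_ifs with h1 h2
    · cases l2 with
      | nil => rfl
      | cons s l2' => simp [pvRun, h1]
    · exact ih _ _
    · exact ih _ _

theorem pvRun_full (cand : List Int) (used hist : PySem.Set Int) (res : List Int) (k : Int)
    (h : (res.length : Int) ≥ k) : pvRun cand used hist res k = (res, used) := by
  cases cand with
  | nil => rfl
  | cons t rest => simp [pvRun, h]

theorem pvWhileA_nil_eq_run (onl : List Int) (hist : PySem.Set Int) (res : List Int) (used : PySem.Set Int) (k : Int)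
    (honl : ∀ s ∈ onl, PySem.Set.contains hist s = false) :
    pvWhileA [] onl res used k = pvRun onl used hist res k := by
  induction onl generalizing res used with
  | nil =>
    simp [pvWhileA, pvRun]
  | cons s onl' ih =>
    rw [pvWhileA]
    have hs : PySem.Set.contains hist s = false := honl s (by simp)
    by_cases hk : (res.length : Int) < k
    · simp only [hk, ne_eq, reduceCtorEq, not_false_eq_true, or_true, and_self, if_true]
      rw [ih _ _ (fun t ht => honl t (by simp [ht]))]
      simp only [pvRun, hs]
      split_ifs with h1 h2 h3 <;> first | rfl | omega | simp_all
    · have : ¬ ((res.length : Int) < k ∧ ([] ≠ ([] : List Int) ∨ s :: onl' ≠ [])) := by tauto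
      rw [if_neg this, pvRun_full _ _ _ _ _ (by omega)]

theorem pvInterleave_nil_right (xs : List Int) : pvInterleave xs [] = xs := by
  cases xs <;> rfl

theorem pvRun_cons (t : Int) (rest : List Int) (used hist : PySem.Set Int) (res : List Int) (k : Int) :
    pvRun (t :: rest) used hist res k =
      if (res.length : Int) ≥ k then (res, used)
      else if ¬ PySem.Set.contains used t ∧ ¬ PySem.Set.contains hist t then
        pvRun rest (PySem.Set.add used t) hist (res ++ [t]) k
      else pvRun rest used hist res k := rfl

theorem pvWhileA_eq_run (off onl : List Int) (hist : PySem.Set Int) (res : List Int) (used : PySem.Set Int) (k : Int)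
    (hoff : ∀ t ∈ off, PySem.Set.contains hist t = false)
    (honl : ∀ s ∈ onl, PySem.Set.contains hist s = false) :
    pvWhileA off onl res used k = pvRun (pvInterleave off onl) used hist res k := by
  induction off generalizing onl res used with
  | nil => exact pvWhileA_nil_eq_run onl hist res used k honl
  | cons t off' ih =>
    rw [pvWhileA]
    have ht : PySem.Set.contains hist t = false := hoff t (by simp)
    have hoff' : ∀ x ∈ off', PySem.Set.contains hist x = false := fun x hx => hoff x (by simp [hx])
    by_cases hk : (res.length : Int) < k
    · rw [if_pos ⟨hk, Or.inl (by simp)⟩]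
      cases onl with
      | nil =>
        rw [pvInterleave_nil_right, pvRun_cons, if_neg (not_le.mpr hk)]
        show (let res1 := if PySem.Set.contains used t then res else res ++ [t]
              let used1 := if PySem.Set.contains used t then used else PySem.Set.add used t
              if (res1.length : Int) ≥ k then (res1, used1)
              else pvWhileA off' [] res1 used1 k) = _
        by_cases hu : PySem.Set.contains used t = true
        · simp only [hu, if_true, not_true_eq_false, false_and, if_false, if_neg (not_le.mpr hk)]
          rw [ih [] _ _ hoff' (by simp), pvInterleave_nil_right]
        · simp only [hu, if_false, Bool.false_eq_true, not_false_eq_true, ht, and_true, if_true]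
          by_cases hfull : ((res ++ [t]).length : Int) ≥ k
          · rw [if_pos hfull, pvRun_full _ _ _ _ _ hfull]
          · rw [if_neg hfull, ih [] _ _ hoff' (by simp), pvInterleave_nil_right]
      | cons s onl' =>
        have hs : PySem.Set.contains hist s = false := honl s (by simp)
        have honl' : ∀ x ∈ onl', PySem.Set.contains hist x = false := fun x hx => honl x (by simp [hx])
        show (let res1 := if PySem.Set.contains used t then res else res ++ [t]
              let used1 := if PySem.Set.contains used t then used else PySem.Set.add used t
              if (res1.length : Int) ≥ k then (res1, used1)
              else
                let res2 := if PySem.Set.contains used1 s then res1 else res1 ++ [s]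
                let used2 := if PySem.Set.contains used1 s then used1 else PySem.Set.add used1 s
                pvWhileA off' onl' res2 used2 k) = _
        rw [pvInterleave, pvRun_cons, if_neg (not_le.mpr hk)]
        by_cases hu : PySem.Set.contains used t = true
        · simp only [hu, if_true, not_true_eq_false, false_and, if_false, if_neg (not_le.mpr hk)]
          rw [pvRun_cons, if_neg (not_le.mpr hk)]
          by_cases hv : PySem.Set.contains used s = true
          · simp only [hv, if_true, not_true_eq_false, false_and, if_false]
            exact ih onl' res used hoff' honl'
          · simp only [hv, if_false, Bool.false_eq_true, not_false_eq_true, hs, and_true, if_true]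
            exact ih onl' _ _ hoff' honl'
        · simp only [hu, if_false, Bool.false_eq_true, not_false_eq_true, ht, and_true, if_true]
          by_cases hfull : ((res ++ [t]).length : Int) ≥ k
          · rw [if_pos hfull, pvRun_full _ _ _ _ _ hfull]
          · rw [if_neg hfull, pvRun_cons, if_neg hfull]
            by_cases hv : PySem.Set.contains (PySem.Set.add used t) s = true
            · simp only [hv, if_true, not_true_eq_false, false_and, if_false]
              exact ih onl' _ _ hoff' honl'
            · simp only [hv, if_false, Bool.false_eq_true, not_false_eq_true, hs, and_true, if_true]
              exact ih onl' _ _ hoff' honl'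
    · rw [if_neg (by tauto), pvRun_full _ _ _ _ _ (by omega)]

-- A's one-pass loop computes: res ++ (dedup of the hist-filtered stream avoiding used), cut at k
theorem pvRun_eq_take (cand : List Int) (used hist : PySem.Set Int) (res : List Int) (k : Int) :
    (pvRun cand used hist res k).1 =
      res ++ (pvDedupAvoid used (cand.filter (fun c => !PySem.Set.contains hist c))).take (k - res.length).toNat := by
  induction cand generalizing used res with
  | nil => simp [pvRun, pvDedupAvoid]
  | cons t rest ih =>
    by_cases hk : (res.length : Int) ≥ k
    · rw [pvRun_full _ _ _ _ _ hk]
      have : (k - (res.length : Int)).toNat = 0 := by omega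
      simp [this]
    · rw [pvRun_cons, if_neg hk]
      by_cases hh : PySem.Set.contains hist t = true
      · simp only [List.filter_cons, hh, Bool.not_true, if_false, Bool.false_eq_true]
        rw [if_neg (by tauto)]
        exact ih used res
      · have hh' : PySem.Set.contains hist t = false := by simpa using hh
        simp only [List.filter_cons, hh', Bool.not_false, if_true]
        by_cases hu : PySem.Set.contains used t = true
        · rw [if_neg (by tauto)]
          rw [ih used res]
          have hm : t ∈ used := by simpa using hu
          simp [pvDedupAvoid, hm]
        · have hu' : PySem.Set.contains used t = false := by simpa using hu
          have hmem : t ∉ used := by simpa using hu'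
          rw [if_pos ⟨by simp [hmem], by simp⟩]
          rw [ih (PySem.Set.add used t) (res ++ [t])]
          simp only [pvDedupAvoid, hu', Bool.false_eq_true, if_false]
          have h1 : (k - (res.length : Int)).toNat = (k - ((res ++ [t]).length : Int)).toNat + 1 := by
            simp only [List.length_append, List.length_cons, List.length_nil]
            omega
          rw [h1, List.take_succ_cons, List.append_assoc]
          rfl

-- fromkeys/first-occurrence dedup = pvDedupAvoid from the empty used-set
theorem foldl_add_eq_dedupAvoid (l : List Int) (s : PySem.Set Int) :
    l.foldl PySem.Set.add s = s ++ pvDedupAvoid s l := by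
  induction l generalizing s with
  | nil => simp [pvDedupAvoid]
  | cons c rest ih =>
    simp only [List.foldl_cons, pvDedupAvoid]
    by_cases hm : c ∈ s
    · have hc : PySem.Set.contains s c = true := by simpa using hm
      rw [if_pos hc, PySem.Set.add_of_mem hm, ih]
    · have hc : PySem.Set.contains s c = false := by simpa using hm
      rw [if_neg (by simpa using hm), PySem.Set.add_of_not_mem hm, ih, List.append_assoc]
      rfl

theorem dedup_eq_dedupAvoid_empty (l : List Int) :
    PySem.List.dedup l = pvDedupAvoid ([] : PySem.Set Int) l := by
  rw [PySem.List.dedup_eq_ofList, PySem.Set.ofList_eq_foldl, foldl_add_eq_dedupAvoid]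
  rfl

-- filterMap of the some-wrapped list is filter
theorem filterMap_map_some (hist : PySem.Set Int) (l : List Int) :
    (l.map some).filterMap (fun c =>
      match c with
      | some x => if PySem.Set.contains hist x then none else some x
      | none => none) = l.filter (fun c => !PySem.Set.contains hist c) := by
  induction l with
  | nil => rfl
  | cons x xs ih =>
    simp only [List.map_cons, List.filterMap_cons, List.filter_cons]
    by_cases hm : x ∈ hist <;> simp [hm] <;> simpa using ih

-- B's pad-zip-flatten stream, hist-filtered, is the interleave of the (already hist-free) filtered lists
theorem zipflat_filterMap (hist : PySem.Set Int) (off onl : List Int)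
    (hoff : ∀ t ∈ off, PySem.Set.contains hist t = false)
    (honl : ∀ s ∈ onl, PySem.Set.contains hist s = false) :
    (((off.map some ++ List.replicate (max off.length onl.length - off.length) (none : Option Int)).zip
      (onl.map some ++ List.replicate (max off.length onl.length - onl.length) (none : Option Int))).flatMap
        (fun p => [p.1, p.2])).filterMap (fun c =>
      match c with
      | some x => if PySem.Set.contains hist x then none else some x
      | none => none) = pvInterleave off onl := by
  induction off generalizing onl with
  | nil =>
    induction onl with
    | nil => rfl
    | cons y ys ihy =>
      have hy : PySem.Set.contains hist y = false := honl y (by simp)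
      simp only [List.map_nil, List.nil_append, List.length_nil, List.length_cons, List.map_cons,
        Nat.zero_max, Nat.sub_zero, Nat.sub_self] at *
      simp only [List.replicate_succ, List.cons_append, List.zip_cons_cons, List.flatMap_cons,
        List.filterMap_cons, List.nil_append, hy,
        Bool.false_eq_true, if_false]
      rw [ihy (fun s hs => honl s (List.mem_cons_of_mem _ hs))]
      rfl
  | cons x xs ihx =>
    have hx : PySem.Set.contains hist x = false := hoff x (by simp)
    have hxs : ∀ t ∈ xs, PySem.Set.contains hist t = false := fun t ht => hoff t (by simp [ht])
    cases onl with
    | nil =>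
      simp only [List.map_nil, List.nil_append, List.length_nil, List.length_cons, Nat.max_zero, Nat.sub_zero, Nat.sub_self,
        List.replicate_zero, List.append_nil, pvInterleave_nil_right]
      rw [show (List.replicate (xs.length + 1) (none : Option Int)) = none :: List.replicate xs.length none from rfl]
      simp only [List.map_cons, List.zip_cons_cons, List.flatMap_cons, List.filterMap_append, List.filterMap_cons, hx,
        Bool.false_eq_true, if_false]
      have := ihx [] hxs (by simp)
      simp only [List.map_nil, List.nil_append, List.length_nil, Nat.max_zero, Nat.sub_zero, Nat.sub_self,
        List.replicate_zero, List.append_nil, pvInterleave_nil_right] at this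
      rw [show (xs.map some).zip (List.replicate xs.length (none : Option Int)) =
            (xs.map some ++ List.replicate 0 none).zip (List.replicate xs.length none) by simp]
      simp only [List.replicate_zero, List.append_nil]
      rw [this]
      simp
    | cons y ys =>
      have hy : PySem.Set.contains hist y = false := honl y (by simp)
      have hys : ∀ s ∈ ys, PySem.Set.contains hist s = false := fun s hs => honl s (by simp [hs])
      simp only [List.length_cons, Nat.succ_max_succ, List.map_cons, List.cons_append,
        List.zip_cons_cons, List.flatMap_cons, List.filterMap_append, List.filterMap_cons, hx, hy,
        Bool.false_eq_true, if_false, pvInterleave]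
      have e1 : (max xs.length ys.length).succ - (xs.length + 1) = max xs.length ys.length - xs.length := by omega
      have e2 : (max xs.length ys.length).succ - (ys.length + 1) = max xs.length ys.length - ys.length := by omega
      rw [e1, e2, ihx ys hxs hys]
      simp

-- membership in the interleave
theorem mem_pvInterleave (a : Int) : ∀ xs ys : List Int, a ∈ pvInterleave xs ys → a ∈ xs ∨ a ∈ ys
  | [], ys, h => Or.inr h
  | x :: xs, [], h => Or.inl (by simpa [pvInterleave_nil_right] using h)
  | x :: xs, y :: ys, h => by
      simp only [pvInterleave, List.mem_cons] at h
      rcases h with h | h | h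
      · exact Or.inl (by simp [h])
      · exact Or.inr (by simp [h])
      · rcases mem_pvInterleave a xs ys h with h' | h'
        · exact Or.inl (by simp [h'])
        · exact Or.inr (by simp [h'])

theorem filter_pvInterleave_self (hist : PySem.Set Int) (off onl : List Int)
    (hoff : ∀ t ∈ off, PySem.Set.contains hist t = false)
    (honl : ∀ s ∈ onl, PySem.Set.contains hist s = false) :
    (pvInterleave off onl).filter (fun c => !PySem.Set.contains hist c) = pvInterleave off onl := by
  apply List.filter_eq_self.mpr
  intro a ha
  rcases mem_pvInterleave a off onl ha with h | h
  · simpa using hoff a h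
  · simpa using honl a h

-- ===== VERDICT =====
theorem merge_recommendations_spec : Claim_equal_merge_recommendations := by
  intro offline_items popular_not_in_history popular_items history_items k _
  unfold Spec_merge_recommendations
  simp only [merge_recommendations, merge_recommendations_alt]
  have hoff : ∀ t ∈ offline_items.filter (fun t => !(PySem.Set.contains (PySem.Set.ofList history_items) t)),
      PySem.Set.contains (PySem.Set.ofList history_items) t = false := fun x hx => by
    simpa using (List.mem_filter.mp hx).2
  have honl : ∀ s ∈ popular_not_in_history.filter (fun t => !(PySem.Set.contains (PySem.Set.ofList history_items) t)),
      PySem.Set.contains (PySem.Set.ofList history_items) s = false := fun x hx => by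
    simpa using (List.mem_filter.mp hx).2
  rw [pvPopLoopA_eq_run, pvWhileA_eq_run _ _ (PySem.Set.ofList history_items) _ _ _ hoff honl,
    ← pvRun_append, pvRun_eq_take, List.filterMap_append,
    zipflat_filterMap (PySem.Set.ofList history_items) _ _ hoff honl, filterMap_map_some,
    List.filter_append, dedup_eq_dedupAvoid_empty,
    filter_pvInterleave_self (PySem.Set.ofList history_items) _ _ hoff honl]
  simp only [List.nil_append, List.length_nil, Int.natCast_zero, Int.sub_zero]
  congr 1
  omega
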